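-- pv_equiv track=rewrite | github.com/JustSlightly4/ResearchProject1 | pybindTest.py | PyHeavyComputation
-- ===== SOURCE A (Python) =====
-- def PyHeavyComputation(x):
-- 	y = 0
-- 	for i in range(x):
-- 		for j in range(x):
-- 			y = y + 1
-- 			if y > 100:
-- 				y = 0
-- 	return y
-- ===== SOURCE B (Python) =====
-- def PyHeavyComputation(x):
--     n = x if x > 0 else 0
--     return (n * n) % 101
-- ===== Notes on version B (the rewrite author's own statement) =====
-- stated objective: faster
-- what changed: replaced the nested counting loops (which count x*x increments, wrapping to 0 past the cap) by a closed form: the square of the positive part reduced by the wrap modulus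
import Mathlib
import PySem

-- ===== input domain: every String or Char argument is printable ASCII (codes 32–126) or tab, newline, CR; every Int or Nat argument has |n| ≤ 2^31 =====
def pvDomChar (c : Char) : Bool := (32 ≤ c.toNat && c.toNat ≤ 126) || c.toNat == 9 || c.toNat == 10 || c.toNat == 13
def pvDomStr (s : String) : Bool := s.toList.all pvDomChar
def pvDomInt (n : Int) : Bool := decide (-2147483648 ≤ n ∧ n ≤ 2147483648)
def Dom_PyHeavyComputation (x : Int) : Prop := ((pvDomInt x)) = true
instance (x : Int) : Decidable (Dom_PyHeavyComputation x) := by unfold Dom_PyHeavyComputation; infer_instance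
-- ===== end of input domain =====

-- B replaces the x*x wrap-around counting loops by the closed form: square of the positive part, reduced by the wrap modulus.

-- ===== PORT A =====
def PyHeavyComputation (x : Int) : Int :=
  (PySem.List.pyRange 0 x 1).foldl (fun y _ =>
    (PySem.List.pyRange 0 x 1).foldl (fun y _ =>
      let y := y + 1
      if y > 100 then 0 else y) y) 0

-- ===== PORT B =====
def PyHeavyComputation_alt (x : Int) : Int :=
  let n := if x > 0 then x else 0
  PySem.Int.mod (n * n) 101

-- ===== PRECONDITION & SPEC =====
def Spec_PyHeavyComputation (x : Int) (out : Int) : Prop := out = PyHeavyComputation_alt x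
instance (x : Int) (out : Int) : Decidable (Spec_PyHeavyComputation x out) := by unfold Spec_PyHeavyComputation; infer_instance

-- ===== CLAIM (what is proved, stated in full; the proofs are below) =====
def Claim_equal_PyHeavyComputation : Prop := ∀ (x : Int), Dom_PyHeavyComputation x → Spec_PyHeavyComputation x (PyHeavyComputation x)

-- ===== LEMMAS AND PROOFS =====

-- inner loop: counting with wrap at 101 adds the list length modulo 101
theorem pv_inner (l : List Int) : ∀ (y : Int), 0 ≤ y → y < 101 →
    l.foldl (fun y _ => let y := y + 1; if y > 100 then 0 else y) y
      = (y + l.length) % 101 := by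
  induction l with
  | nil => intro y h0 h1; simp; omega
  | cons a l ih =>
      intro y h0 h1
      simp only [List.foldl_cons]
      by_cases h : y + 1 > 100
      · simp only [h, if_pos]
        rw [ih 0 (by omega) (by omega)]
        simp only [List.length_cons]
        push_cast
        omega
      · rw [if_neg h]
        rw [ih (y + 1) (by omega) (by omega)]
        simp only [List.length_cons]
        push_cast
        omega

-- outer loop: m iterations of the inner loop add m * l.length modulo 101
theorem pv_outer (l : List Int) (m : List Int) : ∀ (y : Int), 0 ≤ y → y < 101 →
    m.foldl (fun y _ =>
      l.foldl (fun y _ => let y := y + 1; if y > 100 then 0 else y) y) y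
      = (y + (m.length : Int) * l.length) % 101 := by
  induction m with
  | nil => intro y h0 h1; simp; omega
  | cons a m ih =>
      intro y h0 h1
      simp only [List.foldl_cons]
      rw [pv_inner l y h0 h1]
      rw [ih _ (Int.emod_nonneg _ (by omega)) (by omega)]
      simp only [List.length_cons]
      rw [Int.emod_add_emod]
      push_cast
      ring_nf

-- ===== VERDICT (by name: the statement is the Claim_ definition above) =====
theorem PyHeavyComputation_spec : Claim_equal_PyHeavyComputation := by
  intro x _
  unfold Spec_PyHeavyComputation PyHeavyComputation PyHeavyComputation_alt
  rw [pv_outer _ _ 0 le_rfl (by omega)]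
  rw [PySem.Int.mod_eq_emod_of_pos (by omega : (0:Int) < 101)]
  rw [PySem.List.length_pyRange_one]
  by_cases h : x > 0
  · rw [if_pos h]
    have hx : ((x - 0).toNat : Int) = x := by omega
    rw [hx]; ring_nf
  · rw [if_neg h]
    have hx : ((x - 0).toNat : Int) = 0 := by omega
    rw [hx]; norm_num
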